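-- pv_equiv track=rewrite | github.com/BarnabusXzer/CompMethods | HW1/Firstname_Lastname_CWID.py | location_of_largest
-- ===== SOURCE A (Python) =====
-- def location_of_largest(matrixA):
--     largest = 0
--     row = 0
--     col = 0
--     for i in matrixA:
--         for j in i:
--             if abs(j) > abs(largest):
--                 largest = j
--                 col = i.index(j)
--                 row = matrixA.index(i)
--     return row, col
-- ===== SOURCE B (Python) =====
-- def location_of_largest(matrixA):
--     M = max((abs(v) for row in matrixA for v in row), default=0)
--     if M == 0:
--         return 0, 0
--     for r, row in enumerate(matrixA):
--         for c, v in enumerate(row):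
--             if abs(v) == M:
--                 return r, c
-- ===== Notes on version B (the rewrite author's own statement) =====
-- stated objective: alternative
-- what changed: A's single interleaved running-max scan with .index lookups on each update is replaced by two passes: an aggregate pass computing the global maximum absolute value (default 0), then a locate pass returning the first position whose absolute value equals it.
import Mathlib
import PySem

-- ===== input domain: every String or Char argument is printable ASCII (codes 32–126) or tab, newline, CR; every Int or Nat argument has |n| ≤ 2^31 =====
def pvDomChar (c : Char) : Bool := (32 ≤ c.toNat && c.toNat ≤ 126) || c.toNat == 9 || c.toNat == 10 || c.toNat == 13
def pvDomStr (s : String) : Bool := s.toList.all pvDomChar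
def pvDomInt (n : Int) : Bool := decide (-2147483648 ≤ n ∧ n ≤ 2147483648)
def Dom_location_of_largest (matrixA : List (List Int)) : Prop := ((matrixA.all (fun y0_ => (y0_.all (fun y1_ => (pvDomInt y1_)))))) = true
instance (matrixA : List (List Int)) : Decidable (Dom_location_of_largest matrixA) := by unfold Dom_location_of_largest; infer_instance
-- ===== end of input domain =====

-- B replaces A's single running-max scan (with its .index lookups) by an aggregate pass
-- (global maximum absolute value) followed by a first-occurrence locate pass (objective: alternative).

-- ===== PORT A =====
-- state is (largest, row, col); .index(...) always succeeds here (the element/row is present), getD 0 is never the default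
def pvAStep (matrixA : List (List Int)) (i : List Int) (s : Int × Int × Int) (j : Int) : Int × Int × Int :=
  if |j| > |s.1| then (j, (((PySem.List.index? matrixA i).getD 0 : Nat) : Int), (((PySem.List.index? i j).getD 0 : Nat) : Int)) else s

def pvARow (matrixA : List (List Int)) (i : List Int) : List Int → (Int × Int × Int) → Int × Int × Int
  | [], s => s
  | j :: t, s => pvARow matrixA i t (pvAStep matrixA i s j)

def pvAMat (matrixA : List (List Int)) : List (List Int) → (Int × Int × Int) → Int × Int × Int
  | [], s => s
  | i :: t, s => pvAMat matrixA t (pvARow matrixA i i s)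

def location_of_largest (matrixA : List (List Int)) : Int × Int :=
  (pvAMat matrixA matrixA (0, 0, 0)).2

-- ===== PORT B =====
def pvMaxAbs (matrixA : List (List Int)) : Int :=
  matrixA.foldl (fun m row => row.foldl (fun m v => max m |v|) m) 0

def pvFindRow (M : Int) : List Int → Int → Option Int
  | [], _ => none
  | v :: t, c => if |v| = M then some c else pvFindRow M t (c + 1)

-- the [] case is unreachable when M ≠ 0 is the maximal absolute value of the matrix
def pvFindMat (M : Int) : List (List Int) → Int → Int × Int
  | [], _ => (0, 0)
  | row :: t, r =>
    match pvFindRow M row 0 with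
    | some c => (r, c)
    | none => pvFindMat M t (r + 1)

def location_of_largest_alt (matrixA : List (List Int)) : Int × Int :=
  let M := pvMaxAbs matrixA
  if M = 0 then (0, 0) else pvFindMat M matrixA 0

-- ===== PRECONDITION & SPEC =====
def Spec_location_of_largest (matrixA : List (List Int)) (out : Int × Int) : Prop := out = location_of_largest_alt matrixA
instance (matrixA : List (List Int)) (out : Int × Int) : Decidable (Spec_location_of_largest matrixA out) := by unfold Spec_location_of_largest; infer_instance

-- ===== CLAIM (what is proved, stated in full; the proofs are below) =====
def Claim_equal_location_of_largest : Prop := ∀ (matrixA : List (List Int)), Dom_location_of_largest matrixA → Spec_location_of_largest matrixA (location_of_largest matrixA)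

-- ===== LEMMAS AND PROOFS =====

-- clean one-pass fold carrying the true (row, col) indices; both ports are related to it
def pvSRow (r : Int) : List Int → Int → (Int × Int × Int) → Int × Int × Int
  | [], _, s => s
  | v :: t, c, s => pvSRow r t (c + 1) (if |v| > |s.1| then (v, r, c) else s)

def pvSMat : List (List Int) → Int → (Int × Int × Int) → Int × Int × Int
  | [], _, s => s
  | row :: t, r, s => pvSMat t (r + 1) (pvSRow r row 0 s)

lemma pvA_row_eq (A pre rest : List (List Int)) :
    ∀ (t u : List Int) (s : Int × Int × Int),
      A = pre ++ (u ++ t) :: rest →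
      (∀ x, (x ∈ pre.flatMap id ∨ x ∈ u) → |x| ≤ |s.1|) →
      pvARow A (u ++ t) t s = pvSRow (pre.length : Int) t (u.length : Int) s ∧
      (∀ x, (x ∈ pre.flatMap id ∨ x ∈ u ++ t) → |x| ≤ |(pvARow A (u ++ t) t s).1|) := by
  intro t
  induction t with
  | nil =>
    intro u s hA hb
    refine ⟨rfl, ?_⟩
    intro x hx
    exact hb x (by simpa using hx)
  | cons j t ih =>
    intro u s hA hb
    by_cases h : |j| > |s.1|
    · have hju : j ∉ u := by
        intro hmem
        have := hb j (Or.inr hmem)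
        omega
      have hidxcol : PySem.List.index? (u ++ j :: t) j = some u.length := by
        have : u ++ j :: t = (u ++ [j]) ++ t := by simp
        rw [this, PySem.List.index?_append_of_mem _ (by simp),
          PySem.List.index?_append_singleton_self u j hju]
      have hrow_notin : (u ++ j :: t) ∉ pre := by
        intro hmem
        have hj : j ∈ pre.flatMap id := by
          simp only [List.mem_flatMap, id]
          exact ⟨u ++ j :: t, hmem, by simp⟩
        have := hb j (Or.inl hj)
        omega
      have hidxrow : PySem.List.index? A (u ++ j :: t) = some pre.length := by
        rw [hA]
        have : pre ++ (u ++ j :: t) :: rest = (pre ++ [u ++ j :: t]) ++ rest := by simp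
        rw [this, PySem.List.index?_append_of_mem _ (by simp),
          PySem.List.index?_append_singleton_self pre _ hrow_notin]
      have hstep : pvAStep A (u ++ j :: t) s j = (j, (pre.length : Int), (u.length : Int)) := by
        simp only [pvAStep, if_pos h, hidxrow, hidxcol, Option.getD_some]
      have hb' : ∀ x, (x ∈ pre.flatMap id ∨ x ∈ u ++ [j]) →
          |x| ≤ |((j, (pre.length : Int), (u.length : Int)) : Int × Int × Int).1| := by
        intro x hx
        rcases hx with hx | hx
        · have := hb x (Or.inl hx); simp only; omega
        · rcases List.mem_append.1 hx with hx | hx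
          · have := hb x (Or.inr hx); simp only; omega
          · simp only [List.mem_singleton] at hx; subst hx; simp
      have ihsp := ih (u ++ [j]) (j, (pre.length : Int), (u.length : Int))
        (by simpa using hA) hb'
      rcases ihsp with ⟨ih1, ih2⟩
      constructor
      · show pvARow A (u ++ j :: t) t (pvAStep A (u ++ j :: t) s j) = _
        rw [hstep]
        have e1 : u ++ j :: t = (u ++ [j]) ++ t := by simp
        rw [e1, ih1]
        show _ = pvSRow (pre.length : Int) (j :: t) (u.length : Int) s
        simp only [pvSRow, if_pos h, List.length_append, List.length_singleton]
        push_cast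
        rfl
      · intro x hx
        show |x| ≤ |(pvARow A (u ++ j :: t) t (pvAStep A (u ++ j :: t) s j)).1|
        rw [hstep]
        have e1 : u ++ j :: t = (u ++ [j]) ++ t := by simp
        rw [e1]
        apply ih2
        rcases hx with hx | hx
        · exact Or.inl hx
        · rw [e1] at hx
          rcases List.mem_append.1 hx with hx | hx
          · exact Or.inr (List.mem_append.2 (Or.inl hx))
          · exact Or.inr (List.mem_append.2 (Or.inr hx))
    · have hstep : pvAStep A (u ++ j :: t) s j = s := by
        simp only [pvAStep, if_neg h]
      have hb' : ∀ x, (x ∈ pre.flatMap id ∨ x ∈ u ++ [j]) → |x| ≤ |s.1| := by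
        intro x hx
        rcases hx with hx | hx
        · exact hb x (Or.inl hx)
        · rcases List.mem_append.1 hx with hx | hx
          · exact hb x (Or.inr hx)
          · simp only [List.mem_singleton] at hx; subst hx; omega
      have ihsp := ih (u ++ [j]) s (by simpa using hA) hb'
      rcases ihsp with ⟨ih1, ih2⟩
      have e1 : u ++ j :: t = (u ++ [j]) ++ t := by simp
      constructor
      · show pvARow A (u ++ j :: t) t (pvAStep A (u ++ j :: t) s j) = _
        rw [hstep, e1, ih1]
        show _ = pvSRow (pre.length : Int) (j :: t) (u.length : Int) s
        simp only [pvSRow, if_neg h, List.length_append, List.length_singleton]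
        push_cast
        rfl
      · intro x hx
        show |x| ≤ |(pvARow A (u ++ j :: t) t (pvAStep A (u ++ j :: t) s j)).1|
        rw [hstep, e1]
        apply ih2
        rcases hx with hx | hx
        · exact Or.inl hx
        · rw [e1] at hx
          rcases List.mem_append.1 hx with hx | hx
          · exact Or.inr (List.mem_append.2 (Or.inl hx))
          · exact Or.inr (List.mem_append.2 (Or.inr hx))

lemma pvA_mat_eq (A : List (List Int)) :
    ∀ (rest pre : List (List Int)) (s : Int × Int × Int),
      A = pre ++ rest →
      (∀ x ∈ pre.flatMap id, |x| ≤ |s.1|) →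
      pvAMat A rest s = pvSMat rest (pre.length : Int) s := by
  intro rest
  induction rest with
  | nil => intro pre s _ _; rfl
  | cons row t ih =>
    intro pre s hA hb
    have hrow := pvA_row_eq A pre t row [] s (by simpa using hA)
      (fun x hx => by
        rcases hx with hx | hx
        · exact hb x hx
        · simp at hx)
    rcases hrow with ⟨h1, h2⟩
    simp only [List.nil_append, List.length_nil, Nat.cast_zero] at h1 h2
    show pvAMat A t (pvARow A row row s) = _
    rw [h1]
    have hb' : ∀ x ∈ (pre ++ [row]).flatMap id, |x| ≤ |(pvSRow (pre.length : Int) row 0 s).1| := by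
      intro x hx
      rw [← h1]
      simp only [List.flatMap_append, List.mem_append] at hx
      apply h2
      rcases hx with hx | hx
      · exact Or.inl hx
      · right; simpa using hx
    have hrec := ih (pre ++ [row]) (pvSRow (pre.length : Int) row 0 s)
      (by simpa using hA) hb'
    rw [hrec]
    show pvSMat t ((pre ++ [row]).length : Int) _ = pvSMat (row :: t) (pre.length : Int) s
    simp only [pvSMat, List.length_append, List.length_singleton]
    push_cast
    rfl

-- B-side: facts about the nested max-abs fold
lemma pvMaxAbs_eq_flat (m : List (List Int)) :
    pvMaxAbs m = (m.flatMap id).foldl (fun a v => max a |v|) 0 := by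
  suffices h : ∀ (l : List (List Int)) (a : Int),
      l.foldl (fun m row => row.foldl (fun m v => max m |v|) m) a
        = (l.flatMap id).foldl (fun a v => max a |v|) a by
    exact h m 0
  intro l
  induction l with
  | nil => intro a; rfl
  | cons row t ih =>
    intro a
    simp only [List.foldl_cons, List.flatMap_cons, List.foldl_append, id]
    exact ih _

lemma foldF_init_le : ∀ (l : List Int) (a : Int), a ≤ l.foldl (fun a v => max a |v|) a := by
  intro l
  induction l with
  | nil => intro a; simp
  | cons v t ih =>
    intro a
    simp only [List.foldl_cons]
    exact le_trans (le_max_left a |v|) (ih _)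

lemma foldF_mem_le : ∀ (l : List Int) (a x : Int), x ∈ l → |x| ≤ l.foldl (fun a v => max a |v|) a := by
  intro l
  induction l with
  | nil => intro a x hx; simp at hx
  | cons v t ih =>
    intro a x hx
    simp only [List.foldl_cons]
    rcases List.mem_cons.1 hx with hx | hx
    · subst hx; exact le_trans (le_max_right a |x|) (foldF_init_le _ _)
    · exact ih _ x hx

lemma foldF_cases : ∀ (l : List Int) (a : Int),
    l.foldl (fun a v => max a |v|) a = a ∨ ∃ x ∈ l, l.foldl (fun a v => max a |v|) a = |x| := by
  intro l
  induction l with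
  | nil => intro a; exact Or.inl rfl
  | cons v t ih =>
    intro a
    simp only [List.foldl_cons]
    rcases ih (max a |v|) with h | ⟨x, hx, h⟩
    · rw [h]
      rcases max_cases a |v| with ⟨h1, _⟩ | ⟨h1, _⟩
      · exact Or.inl h1
      · exact Or.inr ⟨v, by simp, h1⟩
    · exact Or.inr ⟨x, List.mem_cons_of_mem _ hx, h⟩

-- stability: once the state's |largest| dominates everything left, nothing changes
lemma pvSRow_stable (r : Int) : ∀ (t : List Int) (c : Int) (s : Int × Int × Int),
    (∀ x ∈ t, |x| ≤ |s.1|) → pvSRow r t c s = s := by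
  intro t
  induction t with
  | nil => intro c s _; rfl
  | cons v t ih =>
    intro c s hb
    have hv : ¬ |v| > |s.1| := by have := hb v (by simp); omega
    simp only [pvSRow, if_neg hv]
    exact ih _ s (fun x hx => hb x (List.mem_cons_of_mem _ hx))

lemma pvSMat_stable : ∀ (m : List (List Int)) (r : Int) (s : Int × Int × Int),
    (∀ x ∈ m.flatMap id, |x| ≤ |s.1|) → pvSMat m r s = s := by
  intro m
  induction m with
  | nil => intro r s _; rfl
  | cons row t ih =>
    intro r s hb
    have h1 : pvSRow r row 0 s = s :=
      pvSRow_stable r row 0 s (fun x hx => hb x (by simp; exact Or.inl hx))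
    show pvSMat t (r + 1) (pvSRow r row 0 s) = s
    rw [h1]
    exact ih _ s (fun x hx => hb x (by simp at hx ⊢; exact Or.inr hx))

lemma pvSRow_lt (M r : Int) : ∀ (t : List Int) (c : Int) (s : Int × Int × Int),
    |s.1| < M → (∀ x ∈ t, |x| < M) → |(pvSRow r t c s).1| < M := by
  intro t
  induction t with
  | nil => intro c s hs _; exact hs
  | cons v t ih =>
    intro c s hs hb
    simp only [pvSRow]
    split_ifs with h
    · exact ih _ _ (by simpa using hb v (by simp)) (fun x hx => hb x (List.mem_cons_of_mem _ hx))
    · exact ih _ _ hs (fun x hx => hb x (List.mem_cons_of_mem _ hx))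

lemma pvFindRow_none (M : Int) : ∀ (t : List Int) (c : Int),
    pvFindRow M t c = none ↔ ∀ x ∈ t, |x| ≠ M := by
  intro t
  induction t with
  | nil => intro c; simp [pvFindRow]
  | cons v t ih =>
    intro c
    simp only [pvFindRow]
    split_ifs with h
    · simp only [false_iff]
      intro hall
      exact hall v (by simp) h
    · rw [ih]
      constructor
      · intro hall x hx
        rcases List.mem_cons.1 hx with hx | hx
        · subst hx; exact h
        · exact hall x hx
      · intro hall x hx
        exact hall x (List.mem_cons_of_mem _ hx)

lemma pvSRow_hit (M r : Int) : ∀ (t : List Int) (c : Int) (s : Int × Int × Int) (c' : Int),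
    |s.1| < M → (∀ x ∈ t, |x| ≤ M) → pvFindRow M t c = some c' →
    ∃ v, pvSRow r t c s = (v, r, c') ∧ |v| = M := by
  intro t
  induction t with
  | nil => intro c s c' _ _ hf; simp [pvFindRow] at hf
  | cons v t ih =>
    intro c s c' hs hb hf
    simp only [pvFindRow] at hf
    split_ifs at hf with h
    · injection hf with hc
      subst hc
      have hup : |v| > |s.1| := by omega
      simp only [pvSRow, if_pos hup]
      refine ⟨v, ?_, h⟩
      apply pvSRow_stable
      intro x hx
      have := hb x (List.mem_cons_of_mem _ hx)
      simp only
      omega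
    · simp only [pvSRow]
      split_ifs with hup
      · exact ih _ _ _ (by have := hb v (by simp); simp only; omega)
          (fun x hx => hb x (List.mem_cons_of_mem _ hx)) hf
      · exact ih _ _ _ hs (fun x hx => hb x (List.mem_cons_of_mem _ hx)) hf

lemma pvSMat_find (M : Int) : ∀ (m : List (List Int)) (r : Int) (s : Int × Int × Int),
    |s.1| < M → (∀ x ∈ m.flatMap id, |x| ≤ M) → (∃ x ∈ m.flatMap id, |x| = M) →
    (pvSMat m r s).2 = pvFindMat M m r := by
  intro m
  induction m with
  | nil => intro r s _ _ hex; simp at hex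
  | cons row t ih =>
    intro r s hs hb hex
    show (pvSMat t (r + 1) (pvSRow r row 0 s)).2 = pvFindMat M (row :: t) r
    cases hfr : pvFindRow M row 0 with
    | none =>
      have hne : ∀ x ∈ row, |x| ≠ M := (pvFindRow_none M row 0).1 hfr
      have hlt : ∀ x ∈ row, |x| < M := by
        intro x hx
        have h1 := hb x (by simp; exact Or.inl hx)
        have h2 := hne x hx
        omega
      have hs' : |(pvSRow r row 0 s).1| < M := pvSRow_lt M r row 0 s hs hlt
      have hb' : ∀ x ∈ t.flatMap id, |x| ≤ M := by
        intro x hx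
        exact hb x (by simp at hx ⊢; exact Or.inr hx)
      have hex' : ∃ x ∈ t.flatMap id, |x| = M := by
        rcases hex with ⟨x, hx, hxM⟩
        simp only [List.flatMap_cons, List.mem_append, id] at hx
        rcases hx with hx | hx
        · exact absurd hxM (hne x hx)
        · exact ⟨x, hx, hxM⟩
      rw [ih (r + 1) _ hs' hb' hex']
      simp [pvFindMat, hfr]
    | some c =>
      have hbr : ∀ x ∈ row, |x| ≤ M := fun x hx =>
        hb x (by simp; exact Or.inl hx)
      rcases pvSRow_hit M r row 0 s c hs hbr hfr with ⟨v, hv, hvM⟩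
      rw [hv]
      have : pvSMat t (r + 1) (v, r, c) = (v, r, c) := by
        apply pvSMat_stable
        intro x hx
        have := hb x (by simp at hx ⊢; exact Or.inr hx)
        simp only
        omega
      rw [this]
      simp [pvFindMat, hfr]

-- ===== VERDICT (by name: the statement is the Claim_ definition above) =====
theorem location_of_largest_spec : Claim_equal_location_of_largest := by
  intro m _
  show location_of_largest m = location_of_largest_alt m
  have hA : location_of_largest m = (pvSMat m 0 (0, 0, 0)).2 := by
    unfold location_of_largest
    rw [pvA_mat_eq m m [] (0, 0, 0) (by simp) (by intro x hx; simp at hx)]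
    rfl
  rw [hA]
  unfold location_of_largest_alt
  set M := pvMaxAbs m with hM
  have hMflat : M = (m.flatMap id).foldl (fun a v => max a |v|) 0 := pvMaxAbs_eq_flat m
  have hMle : ∀ x ∈ m.flatMap id, |x| ≤ M := by
    intro x hx; rw [hMflat]; exact foldF_mem_le _ 0 x hx
  by_cases h0 : M = 0
  · rw [if_pos h0]
    have : pvSMat m 0 (0, 0, 0) = (0, 0, 0) := by
      apply pvSMat_stable
      intro x hx
      have := hMle x hx
      show |x| ≤ |(0 : Int)|
      simp only [abs_zero]
      omega
    rw [this]
  · rw [if_neg h0]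
    have hMpos : 0 < M := by
      have := foldF_init_le (m.flatMap id) 0
      rw [← hMflat] at this
      omega
    have hex : ∃ x ∈ m.flatMap id, |x| = M := by
      rcases foldF_cases (m.flatMap id) 0 with h | ⟨x, hx, h⟩
      · rw [← hMflat] at h; omega
      · rw [← hMflat] at h; exact ⟨x, hx, h.symm⟩
    exact pvSMat_find M m 0 (0, 0, 0) (by simpa using hMpos) hMle hex
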